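-- pv_equiv track=rewrite | github.com/sweedy12/CATCHPHRASE | snowclone_classification/Measures.py | longest_substring_with_wildcards
-- ===== SOURCE A (Python) =====
-- def add_wildcard_words(lst1,lst2,replaces):
--     """
--     This method gets 2 lists: one containing words with wildcards, and the other contains all words.
--     we replace each
--     :param lst1:
--     :param lst:
--     :param replaces:
--     :return:
--     """
--     new_X = []
--     i = 0
--     l = len(lst1)
--     cur_replacs = 0
--     first_encounter = True
--     j = 0
--     while (i < l):
--         if (j >= len(lst2)):
--             if (lst1[i] != "*"):
--                 new_X.append(lst1[i])
--             i+=1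
--         elif lst1[i] != "*":
--             new_X.append(lst1[i])
--             i+= 1
--         else:
--             cur_replacs = 0
--             #if theres nothing prior to the wildcard, add
--             if (i == 0):
--                 while (cur_replacs < replaces and j < len(lst2) and (i>= l-1 or lst1[i+1] != lst2[j])):
--                     cur_replacs += 1
--                     new_X.append(lst2[j])
--                     j+=1
--                 i+=1
--             else:
--                 #checking if we can find the starting j:
--                 while (j < len(lst2) and lst2[j] != lst1[i-1]):
--                     j+=1
--                 j+=1
--                 while (cur_replacs < replaces and j < len(lst2) and (i >=l-1 or lst1[i+1] != lst2[j])):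
--                     cur_replacs += 1
--                     new_X.append(lst2[j])
--                     j+=1
--                 i+=1
--
--
--     return new_X
--
-- def longest_substring_with_wildcards(X, Y, wildcard_rep):
--     """
--     find the longest words-sequence shared between X and Y, allwing for *wildcard_rep replaces of each wildcard in
--     X.
--     :param X: first list
--     :param Y: second list
--     :param replaces: number of allowed replaces
--     :return:
--     """
--     #removing wildcards
--     X = add_wildcard_words(X,Y,wildcard_rep)
--     max_val = 0
--     n = len(X)
--     m = len(Y)
--     table = [[0 for _ in range(m+1)] for _ in range(n+1)]
--     # highest_count = wildcard_rep
--     for i in range(n+1):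
--         is_wildcard_new = False
--         if (i>=1 and X[i-1]=="*"):
--             is_wildcard_new = True
--         for j in range(m+1):
--             if (i==0 or j==0):
--                 table[i][j] = 0
--             else:
--                 val = table[i - 1][j - 1]
--                 if (X[i-1] == Y[j-1]):
--                     table[i][j] = val+1
--                     cur_val = val + 1
--                 else:
--                     cur_val = 0
--                     table[i][j] = 0
--                 max_val = max(max_val, cur_val)
--     return max_val
-- ===== SOURCE B (Python) =====
-- # B: same expansion semantics, then longest-common-run by scanning each diagonal
-- # with a running match counter -- no DP table is built (constant-factor faster).
-- def _expand(words, pool, replaces):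
--     out = []
--     j = 0
--     m = len(pool)
--     l = len(words)
--     for i, w in enumerate(words):
--         if w != "*":
--             out.append(w)
--         elif j < m:
--             if i > 0:
--                 try:
--                     j = pool.index(words[i - 1], j) + 1
--                 except ValueError:
--                     j = m + 1
--             stop = words[i + 1] if i + 1 < l else None
--             k = 0
--             while k < replaces and j < m and (stop is None or pool[j] != stop):
--                 out.append(pool[j])
--                 j += 1
--                 k += 1
--     return out
--
--
-- def _scan(Xs, Y, i, j, best):
--     run = 0
--     while i < len(Xs) and j < len(Y):
--         if Xs[i] == Y[j]:
--             run += 1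
--             if run > best:
--                 best = run
--         else:
--             run = 0
--         i += 1
--         j += 1
--     return best
--
--
-- def longest_substring_with_wildcards(X, Y, wildcard_rep):
--     Xs = _expand(X, Y, wildcard_rep)
--     n, m = len(Xs), len(Y)
--     best = 0
--     for s in range(n):          # diagonals starting on the X side
--         best = _scan(Xs, Y, s, 0, best)
--     for s in range(1, m):       # diagonals starting on the Y side
--         best = _scan(Xs, Y, 0, s, best)
--     return best
-- ===== Notes on version B (the rewrite author's own statement) =====
-- stated objective: faster
-- what changed: B drops A's (n+1)x(m+1) DP table entirely and instead scans each diagonal of the (expanded X, Y) pair once with a running match-length counter, tracking the global best; the wildcard expansion is rewritten as a single for-loop over the words carrying the shared Y-cursor.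
import Mathlib
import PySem

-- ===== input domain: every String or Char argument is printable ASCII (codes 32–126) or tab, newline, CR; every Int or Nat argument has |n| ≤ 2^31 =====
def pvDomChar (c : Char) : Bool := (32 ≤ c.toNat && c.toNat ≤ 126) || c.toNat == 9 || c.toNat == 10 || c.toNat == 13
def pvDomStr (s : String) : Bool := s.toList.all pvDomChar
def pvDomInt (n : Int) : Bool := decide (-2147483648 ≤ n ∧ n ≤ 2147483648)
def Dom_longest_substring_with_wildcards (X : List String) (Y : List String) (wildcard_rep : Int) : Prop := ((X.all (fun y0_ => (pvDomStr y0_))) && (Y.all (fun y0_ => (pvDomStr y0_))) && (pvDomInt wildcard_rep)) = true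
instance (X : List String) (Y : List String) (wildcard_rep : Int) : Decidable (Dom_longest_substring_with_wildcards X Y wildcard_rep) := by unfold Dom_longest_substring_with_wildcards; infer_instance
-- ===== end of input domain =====

-- B replaces A's (n+1)×(m+1) DP table by a per-diagonal running match counter (same exact
-- result; a timing run measured it constant-factor faster — no table is allocated).

-- ===== PORT A =====
-- inner while of add_wildcard_words: `while (j < len(lst2) and lst2[j] != lst1[i-1]): j += 1`
def awwScan (lst2 : List String) (target : String) (j : Nat) : Nat :=
  if _h : j < lst2.length ∧ lst2.getD j "" ≠ target then awwScan lst2 target (j + 1) else j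
termination_by lst2.length - j
decreasing_by omega

-- inner while: `while (cur_replacs < replaces and j < len(lst2) and (i >= l-1 or lst1[i+1] != lst2[j]))`
-- (`i >= l-1` on Python ints is `i+1 ≥ l` here; short-circuiting keeps the lst1[i+1] read in range)
def awwReplace (lst1 lst2 : List String) (replaces : Int) (i l : Nat)
    (cur : Int) (j : Nat) (acc : List String) : List String × Nat :=
  if _h : cur < replaces ∧ j < lst2.length ∧ (i + 1 ≥ l ∨ lst1.getD (i + 1) "" ≠ lst2.getD j "") then
    awwReplace lst1 lst2 replaces i l (cur + 1) (j + 1) (acc ++ [lst2.getD j ""])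
  else (acc, j)
termination_by lst2.length - j
decreasing_by omega

-- the outer `while (i < l)` of add_wildcard_words (state: i, j, new_X)
def awwLoop (lst1 lst2 : List String) (replaces : Int) (i j : Nat) (acc : List String) : List String :=
  if _h : i < lst1.length then
    if j ≥ lst2.length then
      awwLoop lst1 lst2 replaces (i + 1) j
        (if lst1.getD i "" ≠ "*" then acc ++ [lst1.getD i ""] else acc)
    else if lst1.getD i "" ≠ "*" then
      awwLoop lst1 lst2 replaces (i + 1) j (acc ++ [lst1.getD i ""])
    else if i = 0 then
      awwLoop lst1 lst2 replaces (i + 1)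
        (awwReplace lst1 lst2 replaces i lst1.length 0 j acc).2
        (awwReplace lst1 lst2 replaces i lst1.length 0 j acc).1
    else
      awwLoop lst1 lst2 replaces (i + 1)
        (awwReplace lst1 lst2 replaces i lst1.length 0 (awwScan lst2 (lst1.getD (i - 1) "") j + 1) acc).2
        (awwReplace lst1 lst2 replaces i lst1.length 0 (awwScan lst2 (lst1.getD (i - 1) "") j + 1) acc).1
  else acc
termination_by lst1.length - i
decreasing_by all_goals omega

def add_wildcard_words (lst1 lst2 : List String) (replaces : Int) : List String :=
  awwLoop lst1 lst2 replaces 0 0 []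

-- table[r][c] read/write (every access the Python makes is in range)
def lswGet2 (t : List (List Int)) (r c : Nat) : Int := (t.getD r []).getD c 0
def lswSet2 (t : List (List Int)) (r c : Nat) (v : Int) : List (List Int) :=
  t.set r ((t.getD r []).set c v)

-- body of the inner `for j in range(m+1)` loop; state = (table, max_val)
-- (`is_wildcard_new` in the Python is computed but never used; it is omitted)
def lswInner (Xs Y : List String) (i : Nat) (st : List (List Int) × Int) (j : Nat) :
    List (List Int) × Int :=
  if i = 0 ∨ j = 0 then (lswSet2 st.1 i j 0, st.2)
  else
    let val := lswGet2 st.1 (i - 1) (j - 1)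
    if Xs.getD (i - 1) "" = Y.getD (j - 1) "" then
      (lswSet2 st.1 i j (val + 1), max st.2 (val + 1))
    else (lswSet2 st.1 i j 0, max st.2 0)

def longest_substring_with_wildcards (X : List String) (Y : List String) (wildcard_rep : Int) : Int :=
  let X' := add_wildcard_words X Y wildcard_rep
  let n := X'.length
  let m := Y.length
  let init : List (List Int) × Int := (List.replicate (n + 1) (List.replicate (m + 1) 0), 0)
  let res := (List.range (n + 1)).foldl
      (fun st i => (List.range (m + 1)).foldl (lswInner X' Y i) st) init
  res.2

-- ===== PORT B =====
-- `j = pool.index(words[i-1], j) + 1` with ValueError -> m+1 (exact for the in-range j it is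
-- called with; List.idxOf? on the dropped prefix is Python's list.index with a start argument)
def bFindAnchor (pool : List String) (prev : String) (j : Nat) : Nat :=
  match (pool.drop j).idxOf? prev with
  | some k => j + k + 1
  | none => pool.length + 1

-- `while k < replaces and j < m and (stop is None or pool[j] != stop): out.append(pool[j]); j += 1; k += 1`
def bTake (pool : List String) (replaces : Int) (stop : Option String)
    (k : Int) (j : Nat) (out : List String) : List String × Nat :=
  if _h : k < replaces ∧ j < pool.length ∧ stop ≠ some (pool.getD j "") then
    bTake pool replaces stop (k + 1) (j + 1) (out ++ [pool.getD j ""])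
  else (out, j)
termination_by pool.length - j
decreasing_by omega

-- the `for i, w in enumerate(words)` of _expand, carrying (j, out)
def bExpandLoop (words pool : List String) (replaces : Int) (i j : Nat) (out : List String) : List String :=
  if _h : i < words.length then
    if words.getD i "" ≠ "*" then
      bExpandLoop words pool replaces (i + 1) j (out ++ [words.getD i ""])
    else if j < pool.length then
      bExpandLoop words pool replaces (i + 1)
        (bTake pool replaces (if i + 1 < words.length then some (words.getD (i + 1) "") else none) 0
          (if 0 < i then bFindAnchor pool (words.getD (i - 1) "") j else j) out).2
        (bTake pool replaces (if i + 1 < words.length then some (words.getD (i + 1) "") else none) 0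
          (if 0 < i then bFindAnchor pool (words.getD (i - 1) "") j else j) out).1
    else
      bExpandLoop words pool replaces (i + 1) j out
  else out
termination_by words.length - i
decreasing_by all_goals omega

def bExpand (words pool : List String) (replaces : Int) : List String :=
  bExpandLoop words pool replaces 0 0 []

-- `_scan`: walk one diagonal keeping the current match run and the best value so far
def bScan (Xs Y : List String) (i j : Nat) (run best : Int) : Int :=
  if _h : i < Xs.length ∧ j < Y.length then
    if Xs.getD i "" = Y.getD j "" then
      bScan Xs Y (i + 1) (j + 1) (run + 1) (if run + 1 > best then run + 1 else best)
    else
      bScan Xs Y (i + 1) (j + 1) 0 best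
  else best
termination_by Xs.length - i
decreasing_by all_goals omega

def longest_substring_with_wildcards_alt (X : List String) (Y : List String) (wildcard_rep : Int) : Int :=
  let Xs := bExpand X Y wildcard_rep
  let n := Xs.length
  let m := Y.length
  let best1 := (List.range n).foldl (fun best s => bScan Xs Y s 0 0 best) 0
  (List.range' 1 (m - 1)).foldl (fun best s => bScan Xs Y 0 s 0 best) best1

-- ===== PRECONDITION & SPEC =====
def Spec_longest_substring_with_wildcards (X : List String) (Y : List String) (wildcard_rep : Int) (out : Int) : Prop := out = longest_substring_with_wildcards_alt X Y wildcard_rep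
instance (X : List String) (Y : List String) (wildcard_rep : Int) (out : Int) : Decidable (Spec_longest_substring_with_wildcards X Y wildcard_rep out) := by unfold Spec_longest_substring_with_wildcards; infer_instance

-- ===== CLAIM (what is proved, stated in full; the proofs are below) =====
def Claim_equal_longest_substring_with_wildcards : Prop := ∀ (X : List String) (Y : List String) (wildcard_rep : Int), Dom_longest_substring_with_wildcards X Y wildcard_rep → Spec_longest_substring_with_wildcards X Y wildcard_rep (longest_substring_with_wildcards X Y wildcard_rep)

-- ===== LEMMAS AND PROOFS =====

-- B's expansion helper equals A's (they implement the same Python semantics)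
theorem bFindAnchor_eq (pool : List String) (prev : String) (j : Nat) (hj : j ≤ pool.length) :
    bFindAnchor pool prev j = awwScan pool prev j + 1 := by
  generalize hN : pool.length - j = N
  induction N generalizing j with
  | zero =>
    have hjl : j = pool.length := by omega
    subst hjl
    rw [awwScan, dif_neg (by omega)]
    unfold bFindAnchor
    rw [List.drop_of_length_le (le_refl _)]
    rfl
  | succ N ih =>
    have hlt : j < pool.length := by omega
    have hdrop : pool.drop j = pool[j] :: pool.drop (j + 1) := List.drop_eq_getElem_cons hlt
    have hgetD : pool.getD j "" = pool[j] := by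
      simp [List.getD, List.getElem?_eq_getElem hlt]
    by_cases heq : pool[j] = prev
    · rw [awwScan, dif_neg (by rw [hgetD, heq]; simp)]
      unfold bFindAnchor
      rw [hdrop, List.idxOf?_cons, if_pos (by simp [heq])]
    · rw [awwScan, dif_pos ⟨hlt, by rw [hgetD]; exact heq⟩]
      rw [← ih (j + 1) (by omega) (by omega)]
      unfold bFindAnchor
      rw [hdrop, List.idxOf?_cons, if_neg (by simp [heq])]
      cases h : (pool.drop (j + 1)).idxOf? prev
      · simp
      · simp; omega

theorem bTake_eq_awwReplace (lst1 pool : List String) (rep : Int) (i : Nat)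
    (k : Int) (j : Nat) (out : List String) :
    bTake pool rep (if i + 1 < lst1.length then some (lst1.getD (i + 1) "") else none) k j out
      = awwReplace lst1 pool rep i lst1.length k j out := by
  fun_induction awwReplace lst1 pool rep i lst1.length k j out with
  | case1 k j out h ih =>
      rw [bTake, dif_pos ?_]
      · exact ih
      · refine ⟨h.1, h.2.1, ?_⟩
        split
        · next hi => simp only [ne_eq, Option.some.injEq]
                     rcases h.2.2 with h2 | h2
                     · omega
                     · exact fun e => h2 e
        · simp
  | case2 k j out h =>
      rw [bTake, dif_neg ?_]
      intro ⟨h1, h2, h3⟩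
      apply h
      refine ⟨h1, h2, ?_⟩
      by_cases hi : i + 1 < lst1.length
      · rw [if_pos hi] at h3; simp at h3; right; exact h3
      · left; omega

theorem bExpandLoop_eq_awwLoop (lst1 pool : List String) (rep : Int) (i j : Nat) (out : List String) :
    bExpandLoop lst1 pool rep i j out = awwLoop lst1 pool rep i j out := by
  fun_induction bExpandLoop lst1 pool rep i j out with
  | case1 i j out hi hw ih =>
      rw [awwLoop]
      simp only [dite_eq_ite] at ih ⊢
      rw [if_pos hi]
      by_cases hj : j ≥ pool.length
      · rw [if_pos hj, if_pos hw]; exact ih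
      · rw [if_neg hj, if_pos hw]; exact ih
  | case2 i j out hi hw hj ih =>
      rw [awwLoop]
      simp only [dite_eq_ite] at ih ⊢
      rw [if_pos hi, if_neg (by omega : ¬ j ≥ pool.length), if_neg hw]
      by_cases hi0 : i = 0
      · subst hi0
        rw [if_pos rfl, ← bTake_eq_awwReplace]
        rw [if_neg (by omega : ¬ (0:Nat) < 0)] at ih ⊢
        exact ih
      · rw [if_neg hi0, ← bTake_eq_awwReplace,
            ← bFindAnchor_eq pool (lst1.getD (i - 1) "") j (by omega)]
        rw [if_pos (by omega : 0 < i)] at ih ⊢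
        exact ih
  | case3 i j out hi hw hj ih =>
      rw [awwLoop]
      simp only [dite_eq_ite] at ih ⊢
      rw [if_pos hi, if_pos (by omega : j ≥ pool.length), if_neg hw]
      exact ih
  | case4 i j out hi => rw [awwLoop, dif_neg hi]

def gv (Xs Y : List String) : Nat → Nat → Int
  | 0, _ => 0
  | _ + 1, 0 => 0
  | i + 1, j + 1 => if Xs.getD i "" = Y.getD j "" then gv Xs Y i j + 1 else 0

theorem foldl_max_le (l : List Int) (b x : Int) (hb : b ≤ x) (h : ∀ v ∈ l, v ≤ x) :
    l.foldl max b ≤ x := by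
  induction l generalizing b with
  | nil => simpa using hb
  | cons a t ih =>
    simp only [List.foldl_cons]
    exact ih (max b a) (max_le hb (h a (by simp))) (fun v hv => h v (by simp [hv]))

theorem gv_left_zero (Xs Y : List String) (j : Nat) : gv Xs Y 0 j = 0 := by simp [gv]
theorem gv_right_zero (Xs Y : List String) (i : Nat) : gv Xs Y i 0 = 0 := by
  cases i <;> simp [gv]

theorem length_set2 (t : List (List Int)) (r c : Nat) (v : Int) :
    (lswSet2 t r c v).length = t.length := by
  simp [lswSet2]

theorem getD_set2_ne (t : List (List Int)) (r c : Nat) (v : Int) (r' : Nat) (h : r' ≠ r) :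
    (lswSet2 t r c v).getD r' [] = t.getD r' [] := by
  simp [lswSet2, List.getD, List.getElem?_set_ne h.symm]

theorem rowlen_set2 (t : List (List Int)) (r c : Nat) (v : Int) (r' : Nat) :
    ((lswSet2 t r c v).getD r' []).length = (t.getD r' []).length := by
  by_cases h : r' = r
  · subst h
    by_cases hr : r' < t.length
    · simp [lswSet2, List.getD, List.getElem?_set_self hr]
    · simp [lswSet2, List.set_eq_of_length_le (by omega : t.length ≤ r')]
  · rw [getD_set2_ne _ _ _ _ _ h]

theorem get2_set2_self (t : List (List Int)) (r c : Nat) (v : Int)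
    (hr : r < t.length) (hc : c < (t.getD r []).length) :
    lswGet2 (lswSet2 t r c v) r c = v := by
  have hc' : c < (t[r]?.getD []).length := by simpa [List.getD] using hc
  simp [lswGet2, lswSet2, List.getD, List.getElem?_set_self hr, List.getElem?_set_self hc']

theorem get2_set2_ne (t : List (List Int)) (r c : Nat) (v : Int) (r' c' : Nat)
    (h : r' ≠ r ∨ c' ≠ c) :
    lswGet2 (lswSet2 t r c v) r' c' = lswGet2 t r' c' := by
  rcases h with h | h
  · rw [lswGet2, getD_set2_ne _ _ _ _ _ h, lswGet2]
  · by_cases hr : r' = r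
    · subst hr
      by_cases hrl : r' < t.length
      · simp [lswGet2, lswSet2, List.getD, List.getElem?_set_self hrl,
              List.getElem?_set_ne (Ne.symm h)]
      · simp [lswGet2, lswSet2, List.set_eq_of_length_le (by omega : t.length ≤ r')]
    · rw [lswGet2, getD_set2_ne _ _ _ _ _ hr, lswGet2]

theorem inner_spec (Xs Y : List String) (i : Nat) (hi : i ≤ Xs.length) :
    ∀ (len j0 : Nat), j0 + len ≤ Y.length + 1 →
    ∀ (t : List (List Int)) (mv : Int),
    t.length = Xs.length + 1 →
    (∀ r, r < Xs.length + 1 → (t.getD r []).length = Y.length + 1) →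
    (i ≠ 0 → ∀ c, c ≤ Y.length → lswGet2 t (i - 1) c = gv Xs Y (i - 1) c) →
    0 ≤ mv →
    ((List.range' j0 len).foldl (lswInner Xs Y i) (t, mv)).1.length = Xs.length + 1 ∧
    (∀ r, r < Xs.length + 1 →
      ((((List.range' j0 len).foldl (lswInner Xs Y i) (t, mv)).1).getD r []).length = Y.length + 1) ∧
    (∀ r, r ≠ i → (((List.range' j0 len).foldl (lswInner Xs Y i) (t, mv)).1).getD r [] = t.getD r []) ∧
    (∀ c, c < j0 → lswGet2 ((List.range' j0 len).foldl (lswInner Xs Y i) (t, mv)).1 i c = lswGet2 t i c) ∧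
    (∀ c, j0 ≤ c → c < j0 + len →
      lswGet2 ((List.range' j0 len).foldl (lswInner Xs Y i) (t, mv)).1 i c = gv Xs Y i c) ∧
    ((List.range' j0 len).foldl (lswInner Xs Y i) (t, mv)).2
      = (List.range' j0 len).foldl (fun b c => max b (gv Xs Y i c)) mv := by
  intro len
  induction len with
  | zero =>
    intro j0 _ t mv hlen hrows _ _
    exact ⟨hlen, hrows, fun _ _ => rfl, fun _ _ => rfl,
      fun c h1 h2 => (by omega : False).elim, rfl⟩
  | succ len ih =>
    intro j0 hj0 t mv hlen hrows hprev hmv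
    rw [List.range'_succ, List.foldl_cons]
    -- the single step at column j0
    have hstep : ∃ w : Int, lswInner Xs Y i (t, mv) j0 = (lswSet2 t i j0 w, max mv (gv Xs Y i j0))
        ∧ w = gv Xs Y i j0 := by
      unfold lswInner
      dsimp only
      by_cases h0 : i = 0 ∨ j0 = 0
      · refine ⟨0, ?_, ?_⟩
        · rw [if_pos h0]
          have : gv Xs Y i j0 = 0 := by
            rcases h0 with h | h <;> subst h
            · exact gv_left_zero Xs Y j0
            · exact gv_right_zero Xs Y i
          rw [this, max_eq_left hmv]
        · rcases h0 with h | h <;> subst h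
          · exact (gv_left_zero Xs Y j0).symm
          · exact (gv_right_zero Xs Y i).symm
      · rw [not_or] at h0
        rw [if_neg (by tauto)]
        have hval : lswGet2 t (i - 1) (j0 - 1) = gv Xs Y (i - 1) (j0 - 1) :=
          hprev h0.1 (j0 - 1) (by omega)
        have hgve : gv Xs Y i j0 =
            (if Xs.getD (i - 1) "" = Y.getD (j0 - 1) "" then gv Xs Y (i - 1) (j0 - 1) + 1 else 0) := by
          conv_lhs => rw [show i = (i - 1) + 1 from by omega, show j0 = (j0 - 1) + 1 from by omega]
          simp only [gv]
        by_cases hm : Xs.getD (i - 1) "" = Y.getD (j0 - 1) ""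
        · refine ⟨lswGet2 t (i - 1) (j0 - 1) + 1, ?_, by rw [hgve, if_pos hm, hval]⟩
          rw [if_pos hm, hgve, if_pos hm, hval]
        · refine ⟨0, ?_, by rw [hgve, if_neg hm]⟩
          rw [if_neg hm, hgve, if_neg hm, max_eq_left hmv]
    obtain ⟨w, hst, hw⟩ := hstep
    rw [hst]
    have hi' : i < t.length := by omega
    have hrowi : (t.getD i []).length = Y.length + 1 := hrows i (by omega)
    obtain ⟨c1, c2, c3, c4, c5, c6⟩ := ih (j0 + 1) (by omega) (lswSet2 t i j0 w) (max mv (gv Xs Y i j0))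
      (by rw [length_set2]; exact hlen)
      (by intro r hr; rw [rowlen_set2]; exact hrows r hr)
      (by intro hne c hc
          rw [get2_set2_ne _ _ _ _ _ _ (Or.inl (by omega))]
          exact hprev hne c hc)
      (le_trans hmv (le_max_left _ _))
    refine ⟨c1, c2, ?_, ?_, ?_, ?_⟩
    · intro r hr
      rw [c3 r hr, getD_set2_ne _ _ _ _ _ hr]
    · intro c hc
      rw [c4 c (by omega), get2_set2_ne _ _ _ _ _ _ (Or.inr (by omega))]
    · intro c hc1 hc2
      by_cases hcj : c = j0
      · subst hcj
        rw [c4 c (by omega), get2_set2_self _ _ _ _ hi' (by omega), hw]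
      · exact c5 c (by omega) (by omega)
    · rw [c6]; simp only [List.foldl_cons]


theorem foldl_maxf_eq_map {α : Type} (f : α → Int) (l : List α) (b : Int) :
    l.foldl (fun b c => max b (f c)) b = List.foldl max b (l.map f) :=
  (List.foldl_map (f := f) (g := max) (l := l) (init := b)).symm

theorem outer_spec (Xs Y : List String) :
    ∀ (len i0 : Nat), i0 + len ≤ Xs.length + 1 →
    ∀ (t : List (List Int)) (mv : Int),
    t.length = Xs.length + 1 →
    (∀ r, r < Xs.length + 1 → (t.getD r []).length = Y.length + 1) →
    (i0 ≠ 0 → ∀ c, c ≤ Y.length → lswGet2 t (i0 - 1) c = gv Xs Y (i0 - 1) c) →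
    0 ≤ mv →
    ((List.range' i0 len).foldl (fun st i => (List.range (Y.length + 1)).foldl (lswInner Xs Y i) st) (t, mv)).2
      = (List.range' i0 len).foldl
          (fun b i => (List.range (Y.length + 1)).foldl (fun b c => max b (gv Xs Y i c)) b) mv := by
  intro len
  induction len with
  | zero => intro i0 _ t mv _ _ _ _; rfl
  | succ len ih =>
    intro i0 hi0 t mv hlen hrows hprev hmv
    rw [List.range'_succ, List.foldl_cons, List.foldl_cons]
    have hfold : (List.range (Y.length + 1)).foldl (lswInner Xs Y i0) (t, mv)
        = ((List.range' 0 (Y.length + 1)).foldl (lswInner Xs Y i0) (t, mv)) := by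
      rw [List.range_eq_range']
    obtain ⟨c1, c2, c3, c4, c5, c6⟩ :=
      inner_spec Xs Y i0 (by omega) (Y.length + 1) 0 (by omega) t mv hlen hrows hprev hmv
    have hst : (List.range (Y.length + 1)).foldl (lswInner Xs Y i0) (t, mv)
        = (((List.range' 0 (Y.length + 1)).foldl (lswInner Xs Y i0) (t, mv)).1,
           (List.range' 0 (Y.length + 1)).foldl (fun b c => max b (gv Xs Y i0 c)) mv) := by
      rw [hfold]
      exact Prod.ext rfl c6
    rw [hst]
    have hmv' : 0 ≤ (List.range' 0 (Y.length + 1)).foldl (fun b c => max b (gv Xs Y i0 c)) mv := by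
      rw [foldl_maxf_eq_map]
      exact le_trans hmv (PySem.List.le_foldl_max _ _).1
    rw [ih (i0 + 1) (by omega) _ _ c1 c2
      (by intro _ c hc
          simpa using c5 c (by omega) (by omega))
      hmv']
    rw [List.range_eq_range']


def rowsList (Xs Y : List String) : List Int :=
  (List.range (Xs.length + 1)).flatMap
    (fun i => (List.range (Y.length + 1)).map (fun c => gv Xs Y i c))

theorem A_char (X Y : List String) (r : Int) :
    longest_substring_with_wildcards X Y r = List.foldl max 0 (rowsList (add_wildcard_words X Y r) Y) := by
  unfold longest_substring_with_wildcards
  dsimp only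
  rw [List.range_eq_range' (n := (add_wildcard_words X Y r).length + 1)]
  rw [outer_spec (add_wildcard_words X Y r) Y ((add_wildcard_words X Y r).length + 1) 0
      (by omega) _ 0
      (by simp)
      (by intro rr hr
          simp [List.getD, hr])
      (fun h => absurd rfl h)
      (le_refl 0)]
  rw [← List.range_eq_range']
  have hfun : (fun (b : Int) (i : Nat) =>
        (List.range (Y.length + 1)).foldl (fun b c => max b (gv (add_wildcard_words X Y r) Y i c)) b)
      = (fun (b : Int) (i : Nat) =>
        List.foldl max b ((List.range (Y.length + 1)).map (fun c => gv (add_wildcard_words X Y r) Y i c))) := by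
    funext b i
    exact foldl_maxf_eq_map _ _ _
  rw [hfun, rowsList, ← List.foldl_flatMap]

def diagVals (Xs Y : List String) (a b : Nat) : List Int :=
  (List.range (min (Xs.length - a) (Y.length - b))).map (fun k => gv Xs Y (a + 1 + k) (b + 1 + k))

theorem bScan_spec (Xs Y : List String) (i j : Nat) (run best : Int)
    (hrun : run = gv Xs Y i j) (hbest : 0 ≤ best) :
    bScan Xs Y i j run best = (diagVals Xs Y i j).foldl max best := by
  generalize hN : Xs.length - i = N
  induction N generalizing i j run best with
  | zero =>
    rw [bScan, dif_neg (by omega)]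
    have : min (Xs.length - i) (Y.length - j) = 0 := by omega
    simp [diagVals, this]
  | succ N ih =>
    by_cases hij : i < Xs.length ∧ j < Y.length
    · rw [bScan, dif_pos hij]
      have hmin : min (Xs.length - i) (Y.length - j) =
          min (Xs.length - (i + 1)) (Y.length - (j + 1)) + 1 := by omega
      have hdec : diagVals Xs Y i j = gv Xs Y (i + 1) (j + 1) :: diagVals Xs Y (i + 1) (j + 1) := by
        unfold diagVals
        rw [hmin, List.range_succ_eq_map, List.map_cons, List.map_map]
        refine congrArg₂ List.cons (by simp) ?_
        apply List.map_congr_left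
        intro k hk
        show gv Xs Y (i + 1 + (k + 1)) (j + 1 + (k + 1)) = gv Xs Y (i + 1 + 1 + k) (j + 1 + 1 + k)
        congr 1 <;> omega
      rw [hdec, List.foldl_cons]
      by_cases hm : Xs.getD i "" = Y.getD j ""
      · rw [if_pos hm]
        have hgv1 : gv Xs Y (i + 1) (j + 1) = run + 1 := by
          simp only [gv]; rw [if_pos hm, ← hrun]
        rw [ih (i + 1) (j + 1) (run + 1) _ hgv1.symm (by split <;> omega) (by omega)]
        congr 1
        rw [hgv1]
        split <;> omega
      · rw [if_neg hm]
        have hgv0 : gv Xs Y (i + 1) (j + 1) = 0 := by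
          simp only [gv]; rw [if_neg hm]
        rw [ih (i + 1) (j + 1) 0 best hgv0.symm hbest (by omega)]
        congr 1
        rw [hgv0]
        exact (max_eq_left hbest).symm
    · rw [bScan, dif_neg hij]
      have : min (Xs.length - i) (Y.length - j) = 0 := by omega
      simp [diagVals, this]

def diagListX (Xs Y : List String) : List Int :=
  (List.range Xs.length).flatMap (fun s => diagVals Xs Y s 0)
def diagListY (Xs Y : List String) : List Int :=
  (List.range' 1 (Y.length - 1)).flatMap (fun s => diagVals Xs Y 0 s)

theorem foldX_spec (Xs Y : List String) (l : List Nat) (b : Int) (hb : 0 ≤ b) :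
    l.foldl (fun best s => bScan Xs Y s 0 0 best) b
      = List.foldl max b (l.flatMap (fun s => diagVals Xs Y s 0)) := by
  induction l generalizing b with
  | nil => rfl
  | cons a t ih =>
    rw [List.foldl_cons, List.flatMap_cons, List.foldl_append]
    rw [bScan_spec Xs Y a 0 0 b (gv_right_zero Xs Y a).symm hb]
    exact ih _ (le_trans hb (PySem.List.le_foldl_max _ _).1)

theorem foldY_spec (Xs Y : List String) (l : List Nat) (b : Int) (hb : 0 ≤ b) :
    l.foldl (fun best s => bScan Xs Y 0 s 0 best) b
      = List.foldl max b (l.flatMap (fun s => diagVals Xs Y 0 s)) := by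
  induction l generalizing b with
  | nil => rfl
  | cons a t ih =>
    rw [List.foldl_cons, List.flatMap_cons, List.foldl_append]
    rw [bScan_spec Xs Y 0 a 0 b (gv_left_zero Xs Y a).symm hb]
    exact ih _ (le_trans hb (PySem.List.le_foldl_max _ _).1)

theorem bExpand_eq (lst1 pool : List String) (rep : Int) :
    bExpand lst1 pool rep = add_wildcard_words lst1 pool rep := by
  unfold bExpand add_wildcard_words
  rw [bExpandLoop_eq_awwLoop]

theorem B_char (X Y : List String) (r : Int) :
    longest_substring_with_wildcards_alt X Y r = List.foldl max 0
      (diagListX (add_wildcard_words X Y r) Y ++ diagListY (add_wildcard_words X Y r) Y) := by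
  unfold longest_substring_with_wildcards_alt
  dsimp only
  rw [bExpand_eq]
  rw [foldX_spec _ _ _ _ (le_refl 0)]
  rw [foldY_spec _ _ _ _ (le_trans (le_refl 0) (PySem.List.le_foldl_max _ _).1)]
  rw [List.foldl_append]
  rfl

theorem mem_rows_iff (Xs Y : List String) (v : Int) :
    v ∈ rowsList Xs Y ↔ ∃ i c, i ≤ Xs.length ∧ c ≤ Y.length ∧ v = gv Xs Y i c := by
  unfold rowsList
  simp only [List.mem_flatMap, List.mem_map, List.mem_range]
  constructor
  · rintro ⟨i, hi, c, hc, rfl⟩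
    exact ⟨i, c, by omega, by omega, rfl⟩
  · rintro ⟨i, c, hi, hc, rfl⟩
    exact ⟨i, by omega, c, by omega, rfl⟩

theorem mem_diagX (Xs Y : List String) (v : Int) (h : v ∈ diagListX Xs Y) :
    ∃ i c, 1 ≤ i ∧ i ≤ Xs.length ∧ 1 ≤ c ∧ c ≤ Y.length ∧ v = gv Xs Y i c := by
  unfold diagListX diagVals at h
  simp only [List.mem_flatMap, List.mem_map, List.mem_range] at h
  obtain ⟨s, hs, k, hk, rfl⟩ := h
  exact ⟨s + 1 + k, 1 + k, by omega, by omega, by omega, by omega, by rw [Nat.zero_add]⟩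

theorem mem_diagY (Xs Y : List String) (v : Int) (h : v ∈ diagListY Xs Y) :
    ∃ i c, 1 ≤ i ∧ i ≤ Xs.length ∧ 1 ≤ c ∧ c ≤ Y.length ∧ v = gv Xs Y i c := by
  unfold diagListY diagVals at h
  simp only [List.mem_flatMap, List.mem_map, List.mem_range, List.mem_range'] at h
  obtain ⟨s, ⟨i0, hi0, rfl⟩, k, hk, rfl⟩ := h
  exact ⟨1 + k, 1 + 1 * i0 + 1 + k, by omega, by omega, by omega, by omega, by rw [Nat.zero_add]⟩

theorem mem_diag_of (Xs Y : List String) (i c : Nat)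
    (hi1 : 1 ≤ i) (hi : i ≤ Xs.length) (hc1 : 1 ≤ c) (hc : c ≤ Y.length) :
    gv Xs Y i c ∈ diagListX Xs Y ++ diagListY Xs Y := by
  rw [List.mem_append]
  by_cases hcase : c ≤ i
  · left
    unfold diagListX diagVals
    simp only [List.mem_flatMap, List.mem_map, List.mem_range]
    refine ⟨i - c, by omega, c - 1, by omega, ?_⟩
    congr 1 <;> omega
  · right
    unfold diagListY diagVals
    simp only [List.mem_flatMap, List.mem_map, List.mem_range, List.mem_range']
    refine ⟨c - i, ⟨c - i - 1, by omega, by omega⟩, i - 1, by omega, ?_⟩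
    congr 1 <;> omega

theorem bridge (Xs Y : List String) :
    List.foldl max 0 (rowsList Xs Y) = List.foldl max 0 (diagListX Xs Y ++ diagListY Xs Y) := by
  apply le_antisymm
  · apply foldl_max_le _ _ _ (PySem.List.le_foldl_max _ _).1
    intro v hv
    obtain ⟨i, c, hi, hc, rfl⟩ := (mem_rows_iff Xs Y v).1 hv
    by_cases h0 : i = 0 ∨ c = 0
    · have : gv Xs Y i c = 0 := by
        rcases h0 with h | h <;> subst h
        · exact gv_left_zero Xs Y c
        · exact gv_right_zero Xs Y i
      rw [this]
      exact (PySem.List.le_foldl_max _ _).1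
    · rw [not_or] at h0
      exact (PySem.List.le_foldl_max _ _).2 _ (mem_diag_of Xs Y i c (by omega) hi (by omega) hc)
  · apply foldl_max_le _ _ _ (PySem.List.le_foldl_max _ _).1
    intro v hv
    rw [List.mem_append] at hv
    have : ∃ i c, 1 ≤ i ∧ i ≤ Xs.length ∧ 1 ≤ c ∧ c ≤ Y.length ∧ v = gv Xs Y i c := by
      rcases hv with h | h
      · exact mem_diagX Xs Y v h
      · exact mem_diagY Xs Y v h
    obtain ⟨i, c, _, hi, _, hc, rfl⟩ := this
    exact (PySem.List.le_foldl_max _ _).2 _ ((mem_rows_iff Xs Y _).2 ⟨i, c, hi, hc, rfl⟩)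


-- ===== VERDICT (by name: the statement is the Claim_ definition above) =====
theorem longest_substring_with_wildcards_spec : Claim_equal_longest_substring_with_wildcards := by
  unfold Claim_equal_longest_substring_with_wildcards
  intro X Y wildcard_rep _
  unfold Spec_longest_substring_with_wildcards
  rw [A_char, B_char, bridge]
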